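-- pv_equiv track=rewrite | github.com/simonw/datasette-big-local | datasette_big_local/__init__.py | alnum_encode
-- ===== SOURCE A (Python) =====
-- ALLOWED = "abcdefghijklmnopqrstuvwxyz" "ABCDEFGHIJKLMNOPQRSTUVWXYZ" "0123456789"
--
-- def alnum_encode(s):
--     encoded = []
--     for char in s:
--         if char in ALLOWED:
--             encoded.append(char)
--         else:
--             encoded.append("_" + hex(ord(char))[2:] + "_")
--     return "".join(encoded)
-- ===== SOURCE B (Python) =====
-- import re
--
--
-- def alnum_encode(s):
--     # One regex substitution: the ASCII-exact class [^a-zA-Z0-9] matches exactly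
--     # the complement of ALLOWED; each match is rewritten to _<hex>_ by the callback.
--     return re.sub(r"[^a-zA-Z0-9]", lambda m: "_" + hex(ord(m.group(0)))[2:] + "_", s)
-- ===== Notes on version B (the rewrite author's own statement) =====
-- stated objective: faster
-- what changed: Replaces the explicit per-character Python loop with accumulator list and join by a single re.sub over the ASCII-exact class [^a-zA-Z0-9] with a callback producing the _hex_ escape; the regex engine does the scan at C speed.
import Mathlib
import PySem

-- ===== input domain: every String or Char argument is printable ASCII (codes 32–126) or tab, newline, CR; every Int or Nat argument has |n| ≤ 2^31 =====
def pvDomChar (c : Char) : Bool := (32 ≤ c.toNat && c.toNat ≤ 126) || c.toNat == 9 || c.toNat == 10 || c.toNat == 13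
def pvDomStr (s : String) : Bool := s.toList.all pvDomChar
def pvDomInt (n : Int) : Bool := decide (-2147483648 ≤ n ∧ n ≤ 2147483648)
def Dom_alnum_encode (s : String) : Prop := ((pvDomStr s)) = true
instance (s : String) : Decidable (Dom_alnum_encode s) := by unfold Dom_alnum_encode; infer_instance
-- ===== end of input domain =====

-- B replaces A's explicit loop/accumulator/join by one re.sub over [^a-zA-Z0-9] (the scan moves into the regex engine; a timing run measured B faster).

-- hex(n)[2:] for a nonnegative n (Python's lowercase hex digits, no prefix); exact for n ≥ 0.
def pvHexDigit (n : Nat) : Char := if n < 10 then Char.ofNat (48 + n) else Char.ofNat (87 + n)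

def pvHex (n : Nat) : List Char :=
  if _h : n < 16 then [pvHexDigit n]
  else pvHex (n / 16) ++ [pvHexDigit (n % 16)]
  decreasing_by exact Nat.div_lt_self (by omega) (by omega)

-- ===== PORT A =====
def pvALLOWED : List Char := "abcdefghijklmnopqrstuvwxyzABCDEFGHIJKLMNOPQRSTUVWXYZ0123456789".toList

def alnum_encode (s : String) : String :=
  -- encoded = []; for char in s: append char or "_" + hex(ord(char))[2:] + "_"; return "".join(encoded)
  let encoded : List (List Char) :=
    s.toList.foldl (fun acc char =>
      if PySem.Chars.isIn [char] pvALLOWED then acc ++ [[char]]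
      else acc ++ ['_' :: (pvHex char.toNat ++ ['_'])]) []
  String.ofList (PySem.Chars.join [] encoded)

-- ===== PORT B =====
-- re.sub with the single-character class [^a-zA-Z0-9]: the engine rewrites each matching
-- character independently through the callback and copies non-matching characters; ported
-- exactly as a per-character flatMap using the ASCII range tests of the class.
def pvClassMatch (c : Char) : Bool :=
  !(('a' ≤ c && c ≤ 'z') || ('A' ≤ c && c ≤ 'Z') || ('0' ≤ c && c ≤ '9'))

def alnum_encode_alt (s : String) : String :=
  String.ofList (s.toList.flatMap (fun c =>
    if pvClassMatch c then '_' :: (pvHex c.toNat ++ ['_']) else [c]))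

-- ===== PRECONDITION & SPEC =====
def Spec_alnum_encode (s : String) (out : String) : Prop := out = alnum_encode_alt s
instance (s : String) (out : String) : Decidable (Spec_alnum_encode s out) := by unfold Spec_alnum_encode; infer_instance

-- ===== CLAIM (what is proved, stated in full; the proofs are below) =====
def Claim_equal_alnum_encode : Prop := ∀ (s : String), Dom_alnum_encode s → Spec_alnum_encode s (alnum_encode s)

-- ===== LEMMAS AND PROOFS =====

theorem pv_join_nil_flatten (ps : List (List Char)) : PySem.Chars.join [] ps = ps.flatten := by
  simp [PySem.Chars.join, List.intercalate]
  induction ps with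
  | nil => simp
  | cons h t ih => cases t <;> simp_all [List.intersperse]

-- A's loop appends one piece per character: it is the map of the per-character piece
theorem pv_foldl_pieces (l : List Char) (acc : List (List Char)) :
    l.foldl (fun acc char =>
      if PySem.Chars.isIn [char] pvALLOWED then acc ++ [[char]]
      else acc ++ ['_' :: (pvHex char.toNat ++ ['_'])]) acc
    = acc ++ l.map (fun char =>
      if PySem.Chars.isIn [char] pvALLOWED then [char]
      else '_' :: (pvHex char.toNat ++ ['_'])) := by
  induction l generalizing acc with
  | nil => simp
  | cons c t ih =>
    by_cases h : PySem.Chars.isIn [c] pvALLOWED <;> simp [h, ih]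

-- A's substring membership test agrees with B's character-class range test on the domain
set_option maxRecDepth 8000 in
theorem pv_mem_eq_class (c : Char) (h : pvDomChar c = true) :
    PySem.Chars.isIn [c] pvALLOWED = !pvClassMatch c := by
  have key : ∀ n, n < 128 →
      PySem.Chars.isIn [Char.ofNat n] pvALLOWED = !pvClassMatch (Char.ofNat n) := by decide
  have hn : c.toNat < 128 := by
    simp [pvDomChar] at h
    omega
  have := key c.toNat hn
  rwa [Char.ofNat_toNat] at this

-- ===== VERDICT (by name: the statement is the Claim_ definition above) =====
theorem alnum_encode_spec : Claim_equal_alnum_encode := by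
  intro s hdom
  unfold Spec_alnum_encode alnum_encode alnum_encode_alt
  have hall : ∀ c ∈ s.toList, pvDomChar c = true := by
    simpa [Dom_alnum_encode, pvDomStr, List.all_eq_true] using hdom
  rw [pv_foldl_pieces, List.nil_append]
  simp only [pv_join_nil_flatten, List.flatMap_def]
  congr 1
  congr 1
  apply List.map_congr_left
  intro c hc
  rw [pv_mem_eq_class c (hall c hc)]
  cases pvClassMatch c <;> simp
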